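-- pv_equiv track=rewrite | github.com/OmniNode-ai/omniintelligence | src/omniintelligence/nodes/node_document_parser_compute/handlers/handler_document_parser.py | _sliding_window_split
-- ===== SOURCE A (Python) =====
-- from typing import NamedTuple
--
-- _TOKEN_ESTIMATE_DIVISOR = 4
--
-- class _Segment(NamedTuple):
--     """A raw text segment with its offset in the original document."""
--
--     text: str
--     offset: int
--     heading: str | None = None
--
-- def _sliding_window_split(
--     text: str,
--     offset: int,
--     heading: str | None,
--     target_tokens: int,
--     overlap_tokens: int,
-- ) -> list[_Segment]:
--     """Split text using a sliding window, breaking at paragraph or sentence boundaries."""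
--     if not text.strip():
--         return []
--
--     segments: list[_Segment] = []
--     # Work in approximate character units (target_tokens * 4 chars)
--     target_chars = target_tokens * _TOKEN_ESTIMATE_DIVISOR
--     overlap_chars = overlap_tokens * _TOKEN_ESTIMATE_DIVISOR
--
--     start = 0
--     text_len = len(text)
--
--     while start < text_len:
--         end = min(start + target_chars, text_len)
--
--         if end < text_len:
--             # Try to break at nearest paragraph boundary before end
--             para_break = text.rfind("\n\n", start, end)
--             if para_break > start + overlap_chars:
--                 end = para_break + 2
--             else:
--                 # Try sentence boundary (. ! ?)
--                 for boundary_char in (".", "!", "?"):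
--                     sent_break = text.rfind(boundary_char, start, end)
--                     if sent_break > start + overlap_chars:
--                         end = sent_break + 1
--                         break
--
--         chunk = text[start:end]
--         if chunk.strip():
--             segments.append(
--                 _Segment(text=chunk, offset=offset + start, heading=heading)
--             )
--
--         if end >= text_len:
--             break
--
--         # Next window starts with overlap
--         start = max(start + 1, end - overlap_chars)
--
--     return segments
-- ===== SOURCE B (Python) =====
-- from bisect import bisect_left
--
--
-- def _occurrences(text, sub):
--     """Sorted list of all occurrence indices of sub in text."""
--     out = []
--     i = text.find(sub)
--     while i != -1:
--         out.append(i)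
--         i = text.find(sub, i + 1)
--     return out
--
--
-- def _break_at(positions, lo, hi):
--     """Largest p in sorted `positions` with lo <= p < hi, else -1."""
--     i = bisect_left(positions, hi)
--     return positions[i - 1] if i > 0 and positions[i - 1] >= lo else -1
--
--
-- def _windows(n, target_chars, overlap_chars, para, dots, bangs, qs):
--     """First pass: compute the (start, end) bounds of every window using
--     bisect lookups into the precomputed boundary-position lists."""
--     wins = []
--     start = 0
--     while start < n:
--         end = min(start + target_chars, n)
--         if end < n:
--             # "\n\n" must fit inside [start, end): p + 2 <= end
--             pb = _break_at(para, start, end - 1)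
--             lim = start + overlap_chars
--             if pb > lim:
--                 end = pb + 2
--             else:
--                 db = _break_at(dots, start, end)
--                 bb = _break_at(bangs, start, end)
--                 qb = _break_at(qs, start, end)
--                 if db > lim:
--                     end = db + 1
--                 elif bb > lim:
--                     end = bb + 1
--                 elif qb > lim:
--                     end = qb + 1
--         wins.append((start, end))
--         if end >= n:
--             break
--         start = max(start + 1, end - overlap_chars)
--     return wins
--
--
-- def _sliding_window_split(text, offset, heading, target_tokens, overlap_tokens):
--     if not text.strip():
--         return []
--     n = len(text)
--     wins = _windows(
--         n,
--         target_tokens * 4,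
--         overlap_tokens * 4,
--         _occurrences(text, "\n\n"),
--         _occurrences(text, "."),
--         _occurrences(text, "!"),
--         _occurrences(text, "?"),
--     )
--     # Second pass: materialise the non-blank chunks.
--     return [
--         (text[s:e], offset + s, heading)
--         for (s, e) in wins
--         if text[s:e].strip()
--     ]
-- ===== Notes on version B (the rewrite author's own statement) =====
-- stated objective: alternative
-- what changed: B precomputes the sorted occurrence lists of the four boundary patterns once and replaces A's per-window backward str.rfind scan by bisect_left lookups; it is also decomposed differently: a first pass computes only the (start, end) window bounds with a chained if instead of A's boundary-character loop, and a second pass materialises the non-blank chunks with a comprehension.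
import Mathlib
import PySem

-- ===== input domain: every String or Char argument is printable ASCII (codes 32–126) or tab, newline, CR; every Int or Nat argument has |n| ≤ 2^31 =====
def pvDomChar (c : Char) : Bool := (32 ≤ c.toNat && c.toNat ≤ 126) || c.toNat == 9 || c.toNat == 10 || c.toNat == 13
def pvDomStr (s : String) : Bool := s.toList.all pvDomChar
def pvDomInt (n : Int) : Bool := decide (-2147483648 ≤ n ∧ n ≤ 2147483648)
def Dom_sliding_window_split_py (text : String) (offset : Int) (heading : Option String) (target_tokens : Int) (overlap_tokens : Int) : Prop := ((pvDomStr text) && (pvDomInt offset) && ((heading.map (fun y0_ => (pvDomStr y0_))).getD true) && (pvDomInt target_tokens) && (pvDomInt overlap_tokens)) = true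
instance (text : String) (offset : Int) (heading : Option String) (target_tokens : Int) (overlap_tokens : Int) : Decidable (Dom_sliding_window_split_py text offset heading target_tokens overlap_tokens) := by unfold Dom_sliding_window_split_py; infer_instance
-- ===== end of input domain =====

-- B precomputes the sorted occurrence lists of the boundary patterns once and
-- replaces A's per-window backward rfind scan by bisect lookups, in two staged
-- passes: window bounds first, then the non-blank chunks (objective:
-- alternative algorithm; equal return value).

-- ===== PORT A =====
-- the `for boundary_char in (".", "!", "?")` loop with break
def sentBoundaryA (text : String) (start end0 oc : Int) : List String → Int
  | [] => end0
  | c :: rest =>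
    let sb := PySem.Str.rfindFrom text c start (some end0)
    if start + oc < sb then sb + 1 else sentBoundaryA text start end0 oc rest

-- the `while start < text_len` loop of A (fuel only makes the loop total: one unit
-- per iteration, and `start` strictly increases, so `len + 1` units never run out)
def awLoop (text : String) (offset : Int) (heading : Option String) (tc oc : Int) :
    Nat → Int → List (String × Int × Option String) → List (String × Int × Option String)
  | 0, _, acc => acc
  | fuel + 1, start, acc =>
    if start < PySem.Str.len text then
      let end0 : Int := min (start + tc) (PySem.Str.len text)
      let end1 : Int :=
        if end0 < PySem.Str.len text then
          let pb := PySem.Str.rfindFrom text "\n\n" start (some end0)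
          if start + oc < pb then pb + 2
          else sentBoundaryA text start end0 oc [".", "!", "?"]
        else end0
      let chunk := PySem.Str.slice text (some start) (some end1)
      let acc' := if PySem.Str.strip chunk == "" then acc else acc ++ [(chunk, offset + start, heading)]
      if PySem.Str.len text ≤ end1 then acc'
      else awLoop text offset heading tc oc fuel (max (start + 1) (end1 - oc)) acc'
    else acc

def sliding_window_split_py (text : String) (offset : Int) (heading : Option String) (target_tokens : Int) (overlap_tokens : Int) : List (String × Int × Option String) :=
  if PySem.Str.strip text == "" then []
  else awLoop text offset heading (target_tokens * 4) (overlap_tokens * 4) ((PySem.Str.len text).toNat + 1) 0 []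

-- ===== PORT B =====
-- Source B `_occurrences` loop: `while i != -1: out.append(i); i = text.find(sub, i + 1)`
-- (`find` only ever yields -1 or an index ≥ 0, so `i != -1` is `i < 0` here; fuel
-- only makes the loop total: found indices strictly increase, so `len + 2` suffices)
def occLoop (text sub : String) : Nat → Int → List Int
  | 0, _ => []
  | fuel + 1, i =>
    if i < 0 then []
    else i :: occLoop text sub fuel (PySem.Str.findFrom text sub (i + 1))

def occurrencesB (text sub : String) : List Int :=
  occLoop text sub ((PySem.Str.len text).toNat + 2) (PySem.Str.find text sub)

-- Source B `_break_at`
def breakAt (pos : List Int) (lo hi : Int) : Int :=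
  let i := PySem.List.bisectLeft pos hi
  if 0 < i ∧ lo ≤ pos.getD (i - 1) 0 then pos.getD (i - 1) 0 else -1

-- Source B `_windows`: first pass, only the (start, end) bounds of each window;
-- the sentence boundaries are a chained if over the three bisect lookups
-- (same fuel discipline as awLoop)
def winLoop (n tc oc : Int) (para dots bangs qs : List Int) : Nat → Int → List (Int × Int)
  | 0, _ => []
  | fuel + 1, start =>
    if start < n then
      let end0 : Int := min (start + tc) n
      let end1 : Int :=
        if end0 < n then
          let pb := breakAt para start (end0 - 1)
          let lim := start + oc
          if lim < pb then pb + 2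
          else
            let db := breakAt dots start end0
            let bb := breakAt bangs start end0
            let qb := breakAt qs start end0
            if lim < db then db + 1
            else if lim < bb then bb + 1
            else if lim < qb then qb + 1
            else end0
        else end0
      (start, end1) ::
        (if n ≤ end1 then []
         else winLoop n tc oc para dots bangs qs fuel (max (start + 1) (end1 - oc)))
    else []

-- Source B's final comprehension: keep the non-blank chunks, in order
def materialize (text : String) (offset : Int) (heading : Option String)
    (wins : List (Int × Int)) : List (String × Int × Option String) :=
  (wins.filter (fun w =>
      !(PySem.Str.strip (PySem.Str.slice text (some w.1) (some w.2)) == ""))).map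
    (fun w => (PySem.Str.slice text (some w.1) (some w.2), offset + w.1, heading))

def sliding_window_split_py_alt (text : String) (offset : Int) (heading : Option String) (target_tokens : Int) (overlap_tokens : Int) : List (String × Int × Option String) :=
  if PySem.Str.strip text == "" then []
  else
    materialize text offset heading
      (winLoop (PySem.Str.len text) (target_tokens * 4) (overlap_tokens * 4)
        (occurrencesB text "\n\n") (occurrencesB text ".") (occurrencesB text "!") (occurrencesB text "?")
        ((PySem.Str.len text).toNat + 1) 0)

-- ===== PRECONDITION & SPEC =====
-- Pre_ excludes negative target_tokens (outside the task's natural domain): there A's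
-- negative window end wraps to the tail of the string via Python's negative slice-bound
-- rule in str.rfind, an accident of A's implementation that B does not mimic.
def Pre_sliding_window_split_py (text : String) (offset : Int) (heading : Option String) (target_tokens : Int) (overlap_tokens : Int) : Prop := 0 ≤ target_tokens
instance (text : String) (offset : Int) (heading : Option String) (target_tokens : Int) (overlap_tokens : Int) : Decidable (Pre_sliding_window_split_py text offset heading target_tokens overlap_tokens) := by unfold Pre_sliding_window_split_py; infer_instance

def pvWitness_sliding_window_split_py : String × Int × Option String × Int × Int :=
  ("Hello. World! Bye", 3, some "h", 2, 1)

def Spec_sliding_window_split_py (text : String) (offset : Int) (heading : Option String) (target_tokens : Int) (overlap_tokens : Int) (out : List (String × Int × Option String)) : Prop := out = sliding_window_split_py_alt text offset heading target_tokens overlap_tokens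
instance (text : String) (offset : Int) (heading : Option String) (target_tokens : Int) (overlap_tokens : Int) (out : List (String × Int × Option String)) : Decidable (Spec_sliding_window_split_py text offset heading target_tokens overlap_tokens out) := by unfold Spec_sliding_window_split_py; infer_instance

-- ===== CLAIM (what is proved, stated in full; the proofs are below) =====
def Claim_equal_sliding_window_split_py : Prop := ∀ (text : String) (offset : Int) (heading : Option String) (target_tokens : Int) (overlap_tokens : Int), Dom_sliding_window_split_py text offset heading target_tokens overlap_tokens → Pre_sliding_window_split_py text offset heading target_tokens overlap_tokens → Spec_sliding_window_split_py text offset heading target_tokens overlap_tokens (sliding_window_split_py text offset heading target_tokens overlap_tokens)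

-- ===== LEMMAS AND PROOFS =====

-- A's backward scan: rfind.go finds the LARGEST j ≤ k at which sub is a prefix of s.drop j
theorem pv_go_neg (s sub : List Char) (k : Nat)
    (h : ∀ j : Nat, j ≤ k → ¬ sub.isPrefixOf (s.drop j) = true) :
    PySem.Chars.rfind.go s sub k = -1 := by
  induction k with
  | zero =>
    rw [PySem.Chars.rfind.go]
    simpa using h 0 (le_refl _)
  | succ j ih =>
    rw [PySem.Chars.rfind.go]
    rw [if_neg (h (j+1) (le_refl _))]
    exact ih (fun i hi => h i (by omega))

theorem pv_go_pos (s sub : List Char) (k m : Nat)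
    (hm : sub.isPrefixOf (s.drop m) = true) (hmk : m ≤ k)
    (hmax : ∀ j : Nat, m < j → j ≤ k → ¬ sub.isPrefixOf (s.drop j) = true) :
    PySem.Chars.rfind.go s sub k = (m : Int) := by
  induction k with
  | zero =>
    rw [PySem.Chars.rfind.go]
    have : m = 0 := by omega
    subst this
    simp only [List.drop_zero] at hm
    simp [hm]
  | succ j ih =>
    rw [PySem.Chars.rfind.go]
    by_cases hj : m = j + 1
    · subst hj; simp [hm]
    · rw [if_neg (hmax (j+1) (by omega) (le_refl _))]
      exact ih (by omega) (fun i hi hik => hmax i hi (by omega))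

-- B's bisect lookup: characterization of breakAt on a strictly sorted list
theorem pv_breakAt_none (pos : List Int) (lo hi : Int)
    (hs : pos.Pairwise (· < ·))
    (hnone : ∀ p ∈ pos, ¬ (lo ≤ p ∧ p < hi)) :
    breakAt pos lo hi = -1 := by
  obtain ⟨hle, hlt, hge⟩ := PySem.List.bisectLeft_spec pos hi (hs.imp (fun h => le_of_lt h))
  set i := PySem.List.bisectLeft pos hi with hi_def
  show (if 0 < i ∧ lo ≤ pos.getD (i - 1) 0 then pos.getD (i - 1) 0 else -1) = -1
  by_cases h0 : 0 < i
  · have hlt' : i - 1 < pos.length := by omega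
    have hmem : pos.getD (i-1) 0 ∈ pos := by
      rw [List.getD_eq_getElem _ _ hlt']; exact List.getElem_mem _
    have h1 := hlt (i-1) hlt' (by omega)
    have h2 := hnone _ hmem
    rw [List.getD_eq_getElem _ _ hlt'] at h2 ⊢
    rw [if_neg (by intro ⟨_, hc⟩; exact h2 ⟨hc, h1⟩)]
  · rw [if_neg (by intro ⟨hc, _⟩; exact h0 hc)]

theorem pv_breakAt_found (pos : List Int) (lo hi p : Int)
    (hs : pos.Pairwise (· < ·)) (hp : p ∈ pos) (hlo : lo ≤ p) (hhi : p < hi)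
    (hmax : ∀ q ∈ pos, q < hi → q ≤ p) :
    breakAt pos lo hi = p := by
  obtain ⟨hle, hlt, hge⟩ := PySem.List.bisectLeft_spec pos hi (hs.imp (fun h => le_of_lt h))
  set i := PySem.List.bisectLeft pos hi with hi_def
  show (if 0 < i ∧ lo ≤ pos.getD (i - 1) 0 then pos.getD (i - 1) 0 else -1) = p
  obtain ⟨j, hj, hjp⟩ := List.mem_iff_getElem.mp hp
  have hji : j < i := by
    by_contra hc
    have := hge j hj (by omega)
    omega
  have h0 : 0 < i := by omega
  have hlt' : i - 1 < pos.length := by omega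
  have hsorted := List.pairwise_iff_getElem.mp hs
  have htop : pos[i-1] < hi := hlt (i-1) hlt' (by omega)
  have hgej : p ≤ pos[i-1] := by
    rcases Nat.lt_or_ge j (i-1) with hlt2 | hge2
    · have := hsorted j (i-1) hj hlt' hlt2; omega
    · have : j = i - 1 := by omega
      subst this; omega
  have hmemtop : pos[i-1] ∈ pos := List.getElem_mem _
  have hle2 : pos[i-1] ≤ p := hmax _ hmemtop htop
  have heq : pos[i-1] = p := le_antisymm hle2 hgej
  rw [List.getD_eq_getElem _ _ hlt', heq, if_pos (⟨h0, hlo⟩)]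

-- occurrence of sub inside the truncated window, translated to the full string
theorem pv_prefix_window (cs sub : List Char) (lo' hi' j : Nat)
    (hsub : sub ≠ []) (hh : hi' ≤ cs.length) :
    sub.isPrefixOf (((cs.take hi').drop lo').drop j) = true ↔
      (sub.isPrefixOf (cs.drop (lo' + j)) = true ∧ lo' + j + sub.length ≤ hi') := by
  have hlen : 1 ≤ sub.length := by
    cases sub with | nil => exact absurd rfl hsub | cons a l => simp
  rw [List.drop_drop, List.drop_take]
  rw [List.isPrefixOf_iff_prefix, List.isPrefixOf_iff_prefix, List.prefix_take_iff]
  constructor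
  · rintro ⟨h1, h2⟩; exact ⟨h1, by omega⟩
  · rintro ⟨h1, h2⟩; exact ⟨h1, by omega⟩

theorem pv_rfindFrom_eq_breakAt (cs sub : List Char) (pos : List Int) (lo hi : Int)
    (hsub : sub ≠ [])
    (hsorted : pos.Pairwise (· < ·))
    (hmem : ∀ p : Int, p ∈ pos ↔ 0 ≤ p ∧ sub.isPrefixOf (cs.drop p.toNat) = true)
    (h0 : 0 ≤ lo) (h1 : lo ≤ hi) (h2 : hi ≤ (cs.length : Int)) :
    PySem.Chars.rfindFrom cs sub lo (some hi) = breakAt pos lo (hi - sub.length + 1) := by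
  have hlen1 : 1 ≤ sub.length := by
    cases sub with | nil => exact absurd rfl hsub | cons a l => simp
  -- reduce rfindFrom to rfind on the window
  have hred : PySem.Chars.rfindFrom cs sub lo (some hi) =
      (if PySem.Chars.rfind ((cs.take hi.toNat).drop lo.toNat) sub = -1 then -1
       else lo + PySem.Chars.rfind ((cs.take hi.toNat).drop lo.toNat) sub) := by
    simp only [PySem.Chars.rfindFrom]
    rw [if_neg (by omega : ¬ (cs.length : Int) < hi), if_neg (by omega : ¬ hi < 0),
        if_neg (by omega : ¬ lo < 0), if_neg (by omega : ¬ hi < lo)]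
  set t : List Char := (cs.take hi.toNat).drop lo.toNat with ht
  have htlen : t.length = hi.toNat - lo.toNat := by
    simp [ht, List.length_drop, List.length_take]; omega
  by_cases hex : ∃ p ∈ pos, lo ≤ p ∧ p < hi - sub.length + 1
  · -- a boundary exists; take the largest candidate
    obtain ⟨p0, hp0, hp0b⟩ := hex
    set cand := pos.filter (fun p => decide (lo ≤ p) && decide (p ≤ hi - sub.length)) with hcand
    have hp0c : p0 ∈ cand := by
      rw [hcand, List.mem_filter]
      simp only [Bool.and_eq_true, decide_eq_true_eq]
      exact ⟨hp0, hp0b.1, by omega⟩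
    obtain ⟨pm, hpm⟩ : ∃ m, cand.max? = some m := by
      cases hc : cand.max? with
      | none => rw [List.max?_eq_none_iff] at hc; rw [hc] at hp0c; simp at hp0c
      | some m => exact ⟨m, rfl⟩
    rw [List.max?_eq_some_iff] at hpm
    obtain ⟨hpm_mem, hpm_max⟩ := hpm
    have hpm_pos : pm ∈ pos := (List.mem_filter.mp hpm_mem).1
    have hpm_b : lo ≤ pm ∧ pm < hi - sub.length + 1 := by
      have := (List.mem_filter.mp hpm_mem).2
      simp only [Bool.and_eq_true, decide_eq_true_eq] at this
      exact ⟨this.1, by omega⟩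
    have hBB : breakAt pos lo (hi - sub.length + 1) = pm := by
      apply pv_breakAt_found pos _ _ pm hsorted hpm_pos hpm_b.1 hpm_b.2
      intro q hq hqlt
      by_cases hql : lo ≤ q
      · exact hpm_max q (by
          rw [hcand, List.mem_filter]
          simp only [Bool.and_eq_true, decide_eq_true_eq]
          exact ⟨hq, hql, by omega⟩)
      · omega
    rw [hBB, hred]
    have hpm_spec := (hmem pm).mp hpm_pos
    -- the window-relative index of pm
    have hj : sub.isPrefixOf (t.drop (pm.toNat - lo.toNat)) = true := by
      rw [ht, pv_prefix_window cs sub lo.toNat hi.toNat _ hsub (by omega)]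
      constructor
      · have : lo.toNat + (pm.toNat - lo.toNat) = pm.toNat := by omega
        rw [this]; exact hpm_spec.2
      · omega
    have hrf : PySem.Chars.rfind t sub = ((pm.toNat - lo.toNat : Nat) : Int) := by
      show PySem.Chars.rfind.go t sub t.length = _
      apply pv_go_pos t sub t.length _ hj (by omega)
      intro j hjgt hjle hpf
      rw [ht, pv_prefix_window cs sub lo.toNat hi.toNat j hsub (by omega)] at hpf
      have hqmem : ((lo.toNat + j : Nat) : Int) ∈ pos := by
        rw [hmem]; constructor
        · omega
        · have : ((lo.toNat + j : Nat) : Int).toNat = lo.toNat + j := by omega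
          rw [this]; exact hpf.1
      have hcast : ((lo.toNat + j : Nat) : Int) = lo + j := by omega
      rw [hcast] at hqmem
      have := hpm_max (lo + j) (by
        rw [hcand, List.mem_filter]
        simp only [Bool.and_eq_true, decide_eq_true_eq]
        exact ⟨hqmem, by omega, by omega⟩)
      omega
    rw [hrf, if_neg (by omega)]
    omega
  · -- no boundary in the window on either side
    push_neg at hex
    have hBB : breakAt pos lo (hi - sub.length + 1) = -1 := by
      apply pv_breakAt_none pos _ _ hsorted
      intro p hp ⟨ha, hb⟩
      exact absurd hb (by have := hex p hp ha; omega)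
    rw [hBB, hred]
    have hrf : PySem.Chars.rfind t sub = -1 := by
      show PySem.Chars.rfind.go t sub t.length = _
      apply pv_go_neg
      intro j hjle hpf
      rw [ht, pv_prefix_window cs sub lo.toNat hi.toNat j hsub (by omega)] at hpf
      have hqmem : ((lo.toNat + j : Nat) : Int) ∈ pos := by
        rw [hmem]; constructor
        · omega
        · have : ((lo.toNat + j : Nat) : Int).toNat = lo.toNat + j := by omega
          rw [this]; exact hpf.1
      have := hex _ hqmem (by omega)
      omega
    rw [hrf, if_pos rfl]

theorem pv_findFrom_ge_neg_one (s sub : List Char) (st : Int) (h0 : 0 ≤ st) :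
    -1 ≤ PySem.Chars.findFrom s sub st none := by
  have hr := PySem.Chars.neg_one_le_find (List.drop st.toNat (List.take (s.length:Int).toNat s)) sub
  simp only [PySem.Chars.findFrom] at *
  split_ifs at * <;> omega

theorem pv_occLoop_invariant (text sub : String) (hsub : sub.toList ≠ []) :
    ∀ (fuel k0 : Nat), k0 ≤ text.toList.length → text.toList.length + 1 - k0 ≤ fuel →
    (occLoop text sub fuel (PySem.Chars.findFrom text.toList sub.toList (k0 : Int) none)).Pairwise (· < ·) ∧
    (∀ p ∈ occLoop text sub fuel (PySem.Chars.findFrom text.toList sub.toList (k0 : Int) none),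
        (k0 : Int) ≤ p ∧ sub.toList.isPrefixOf (text.toList.drop p.toNat) = true) ∧
    (∀ q : Nat, k0 ≤ q → sub.toList.isPrefixOf (text.toList.drop q) = true →
        (q : Int) ∈ occLoop text sub fuel (PySem.Chars.findFrom text.toList sub.toList (k0 : Int) none)) := by
  intro fuel
  induction fuel with
  | zero =>
    intro k0 hk hf
    exact absurd hf (by omega)
  | succ fuel ih =>
    intro k0 hk hf
    set i := PySem.Chars.findFrom text.toList sub.toList (k0 : Int) none with hi_def
    by_cases hineg : i < 0
    · -- no further occurrence
      have hiff := PySem.Chars.findFrom_natCast_eq_neg_one_iff text.toList sub.toList k0 hk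
      have hge := pv_findFrom_ge_neg_one text.toList sub.toList (k0 : Int) (by omega)
      have hneg : i = -1 := by rw [hi_def] at *; omega
      have hnocc : ¬ sub.toList <:+: text.toList.drop k0 := by
        rw [← hiff, ← hi_def]; exact hneg
      rw [occLoop, if_pos hineg]
      refine ⟨List.Pairwise.nil, by simp, ?_⟩
      intro q hq hpf
      exfalso
      apply hnocc
      rw [← PySem.Chars.isIn_iff_infix, ← PySem.Chars.exists_prefix_drop_iff_isIn]
      refine ⟨q - k0, ?_⟩
      rw [List.drop_drop]
      have : k0 + (q - k0) = q := by omega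
      rw [this]
      exact List.isPrefixOf_iff_prefix.mp hpf
    · -- found an occurrence at i
      have hspec := PySem.Chars.findFrom_natCast_spec text.toList sub.toList k0 hk
        (by rw [← hi_def]; omega)
      rw [← hi_def] at hspec
      obtain ⟨hki, hpref, hmin⟩ := hspec
      have hprefB : sub.toList.isPrefixOf (text.toList.drop i.toNat) = true :=
        List.isPrefixOf_iff_prefix.mpr hpref
      -- the occurrence of a nonempty pattern lies strictly inside the text
      have hilt : i.toNat < text.toList.length := by
        by_contra hge
        have : text.toList.drop i.toNat = [] := List.drop_eq_nil_of_le (by omega)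
        rw [this] at hpref
        exact hsub (List.prefix_nil.mp hpref)
      have hcast : (i + 1 : Int) = ((i.toNat + 1 : Nat) : Int) := by omega
      have hnext : PySem.Str.findFrom text sub (i + 1) =
          PySem.Chars.findFrom text.toList sub.toList ((i.toNat + 1 : Nat) : Int) none := by
        rw [hcast]; simp [PySem.Str.findFrom]
      obtain ⟨ihp, ihm, ihc⟩ := ih (i.toNat + 1) (by omega) (by omega)
      rw [occLoop, if_neg hineg, hnext]
      refine ⟨?_, ?_, ?_⟩
      · refine List.Pairwise.cons ?_ ihp
        intro p hp
        have := (ihm p hp).1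
        omega
      · intro p hp
        rcases List.mem_cons.mp hp with rfl | hp'
        · exact ⟨by omega, hprefB⟩
        · have := ihm p hp'
          exact ⟨by omega, this.2⟩
      · intro q hq hpf
        rcases Nat.lt_trichotomy q i.toNat with hlt | heq | hgt
        · exfalso
          exact hmin q hq hlt (List.isPrefixOf_iff_prefix.mp hpf)
        · rw [heq]
          have hq2 : ((i.toNat : Nat) : Int) = i := by omega
          rw [hq2]; exact List.mem_cons_self ..
        · exact List.mem_cons_of_mem _ (ihc q (by omega) hpf)

theorem pv_occurrencesB_spec (text sub : String) (hsub : sub.toList ≠ []) :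
    (occurrencesB text sub).Pairwise (· < ·) ∧
    (∀ p : Int, p ∈ occurrencesB text sub ↔ 0 ≤ p ∧ sub.toList.isPrefixOf (text.toList.drop p.toNat) = true) := by
  have h0 : PySem.Str.find text sub = PySem.Chars.findFrom text.toList sub.toList ((0:Nat) : Int) none := by
    simp [PySem.Str.find, PySem.Chars.findFrom_zero]
  have hfe : (PySem.Str.len text).toNat + 2 = text.toList.length + 2 := by
    simp [PySem.Str.len_eq]
  obtain ⟨hp, hm, hc⟩ := pv_occLoop_invariant text sub hsub (text.toList.length + 2) 0 (by omega) (by omega)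
  unfold occurrencesB
  rw [h0, hfe]
  refine ⟨hp, ?_⟩
  intro p
  constructor
  · intro hp'
    have := hm p hp'
    exact ⟨by exact_mod_cast this.1, this.2⟩
  · rintro ⟨hge, hpf⟩
    have := hc p.toNat (by omega) hpf
    have hcast : ((p.toNat : Nat) : Int) = p := by omega
    rwa [hcast] at this

theorem pv_materialize_cons (t : String) (o : Int) (h : Option String)
    (s e : Int) (rest : List (Int × Int)) :
    materialize t o h ((s, e) :: rest) =
      (if PySem.Str.strip (PySem.Str.slice t (some s) (some e)) == "" then
        materialize t o h rest
      else (PySem.Str.slice t (some s) (some e), o + s, h) :: materialize t o h rest) := by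
  simp only [materialize, List.filter_cons]
  split_ifs with h1 h2 h3 <;> simp_all

-- A's accumulator loop equals B's staged passes (bounds first, chunks after)
theorem pv_loop_eq (text : String) (offset : Int) (heading : Option String)
    (tc oc : Int) (htc : 0 ≤ tc) :
    ∀ (fuel : Nat) (start : Int) (acc : List (String × Int × Option String)),
      0 ≤ start →
      awLoop text offset heading tc oc fuel start acc =
        acc ++ materialize text offset heading
          (winLoop (PySem.Str.len text) tc oc
            (occurrencesB text "\n\n") (occurrencesB text ".") (occurrencesB text "!") (occurrencesB text "?")
            fuel start) := by
  intro fuel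
  induction fuel with
  | zero =>
    intro start acc h0
    simp [awLoop, winLoop, materialize]
  | succ fuel ih =>
    intro start acc h0
    rw [awLoop, winLoop]
    by_cases hlt : start < PySem.Str.len text
    · rw [if_pos hlt]; rw [if_pos hlt]
      obtain ⟨hsorP, hmemP⟩ := pv_occurrencesB_spec text "\n\n" (by decide)
      obtain ⟨hsorD, hmemD⟩ := pv_occurrencesB_spec text "." (by decide)
      obtain ⟨hsorE, hmemE⟩ := pv_occurrencesB_spec text "?" (by decide)
      obtain ⟨hsorX, hmemX⟩ := pv_occurrencesB_spec text "!" (by decide)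
      have hlo : start ≤ min (start + tc) (PySem.Str.len text) := by
        simp only [PySem.Str.len_eq] at *; omega
      have hhi : min (start + tc) (PySem.Str.len text) ≤ (text.toList.length : Int) := by
        simp only [PySem.Str.len_eq]; omega
      have hpb : PySem.Str.rfindFrom text "\n\n" start (some (min (start + tc) (PySem.Str.len text))) =
          breakAt (occurrencesB text "\n\n") start (min (start + tc) (PySem.Str.len text) - 1) := by
        have h := pv_rfindFrom_eq_breakAt text.toList ("\n\n").toList (occurrencesB text "\n\n")
          start (min (start + tc) (PySem.Str.len text)) (by decide) hsorP hmemP h0 hlo hhi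
        rw [show ((("\n\n").toList.length : Nat) : Int) = 2 from by decide] at h
        rw [show min (start + tc) (PySem.Str.len text) - (2:Int) + 1 = min (start + tc) (PySem.Str.len text) - 1 from by ring] at h
        simpa [PySem.Str.rfindFrom] using h
      have hdot : PySem.Str.rfindFrom text "." start (some (min (start + tc) (PySem.Str.len text))) =
          breakAt (occurrencesB text ".") start (min (start + tc) (PySem.Str.len text)) := by
        have h := pv_rfindFrom_eq_breakAt text.toList (".").toList (occurrencesB text ".")
          start (min (start + tc) (PySem.Str.len text)) (by decide) hsorD hmemD h0 hlo hhi
        rw [show (((".").toList.length : Nat) : Int) = 1 from by decide] at h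
        rw [show min (start + tc) (PySem.Str.len text) - (1:Int) + 1 = min (start + tc) (PySem.Str.len text) from by ring] at h
        simpa [PySem.Str.rfindFrom] using h
      have hbang : PySem.Str.rfindFrom text "!" start (some (min (start + tc) (PySem.Str.len text))) =
          breakAt (occurrencesB text "!") start (min (start + tc) (PySem.Str.len text)) := by
        have h := pv_rfindFrom_eq_breakAt text.toList ("!").toList (occurrencesB text "!")
          start (min (start + tc) (PySem.Str.len text)) (by decide) hsorX hmemX h0 hlo hhi
        rw [show ((("!").toList.length : Nat) : Int) = 1 from by decide] at h
        rw [show min (start + tc) (PySem.Str.len text) - (1:Int) + 1 = min (start + tc) (PySem.Str.len text) from by ring] at h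
        simpa [PySem.Str.rfindFrom] using h
      have hq : PySem.Str.rfindFrom text "?" start (some (min (start + tc) (PySem.Str.len text))) =
          breakAt (occurrencesB text "?") start (min (start + tc) (PySem.Str.len text)) := by
        have h := pv_rfindFrom_eq_breakAt text.toList ("?").toList (occurrencesB text "?")
          start (min (start + tc) (PySem.Str.len text)) (by decide) hsorE hmemE h0 hlo hhi
        rw [show ((("?").toList.length : Nat) : Int) = 1 from by decide] at h
        rw [show min (start + tc) (PySem.Str.len text) - (1:Int) + 1 = min (start + tc) (PySem.Str.len text) from by ring] at h
        simpa [PySem.Str.rfindFrom] using h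
      have hsent : sentBoundaryA text start (min (start + tc) (PySem.Str.len text)) oc [".", "!", "?"] =
          (if start + oc < breakAt (occurrencesB text ".") start (min (start + tc) (PySem.Str.len text)) then
             breakAt (occurrencesB text ".") start (min (start + tc) (PySem.Str.len text)) + 1
           else if start + oc < breakAt (occurrencesB text "!") start (min (start + tc) (PySem.Str.len text)) then
             breakAt (occurrencesB text "!") start (min (start + tc) (PySem.Str.len text)) + 1
           else if start + oc < breakAt (occurrencesB text "?") start (min (start + tc) (PySem.Str.len text)) then
             breakAt (occurrencesB text "?") start (min (start + tc) (PySem.Str.len text)) + 1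
           else min (start + tc) (PySem.Str.len text)) := by
        simp only [sentBoundaryA]
        rw [hdot, hbang, hq]
      simp only [hpb, hsent, pv_materialize_cons]
      split_ifs <;>
        first
          | exact ih _ _ (by omega)
          | (simp [materialize]; done)
          | (rw [ih _ _ (by omega)]; simp; done)
    · rw [if_neg hlt]; rw [if_neg hlt]; simp [materialize]

-- ===== VERDICT (by name: the statement is the Claim_ definition above) =====
theorem sliding_window_split_py_spec : Claim_equal_sliding_window_split_py := by
  intro text offset heading target_tokens overlap_tokens _hdom hpre
  unfold Spec_sliding_window_split_py
  unfold sliding_window_split_py sliding_window_split_py_alt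
  split
  · rfl
  · simpa using pv_loop_eq text offset heading _ _ (by
      have : (0:Int) ≤ target_tokens := hpre
      omega) ((PySem.Str.len text).toNat + 1) 0 [] (le_refl 0)
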